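-- pv_equiv track=rewrite | github.com/zhuy1228/go-maya | maya1_server.py | unpack_snac_tokens
-- ===== SOURCE A (Python) =====
-- CODE_END_TOKEN_ID   = 128258   # End of Speech (EOS)
--
-- CODE_TOKEN_OFFSET   = 128266   # SNAC 编码起始偏移
--
-- SNAC_TOKENS_PER_FRAME = 7
--
-- def unpack_snac_tokens(vocab_ids):
--     """将 7-token SNAC 帧解包为 3 层级编码 [L1, L2, L3]"""
--     if vocab_ids and vocab_ids[-1] == CODE_END_TOKEN_ID:
--         vocab_ids = vocab_ids[:-1]
--
--     frames = len(vocab_ids) // SNAC_TOKENS_PER_FRAME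
--     vocab_ids = vocab_ids[:frames * SNAC_TOKENS_PER_FRAME]
--
--     if frames == 0:
--         return [[], [], []]
--
--     l1, l2, l3 = [], [], []
--     for i in range(frames):
--         slots = vocab_ids[i * 7:(i + 1) * 7]
--         l1.append((slots[0] - CODE_TOKEN_OFFSET) % 4096)
--         l2.extend([
--             (slots[1] - CODE_TOKEN_OFFSET) % 4096,
--             (slots[4] - CODE_TOKEN_OFFSET) % 4096,
--         ])
--         l3.extend([
--             (slots[2] - CODE_TOKEN_OFFSET) % 4096,
--             (slots[3] - CODE_TOKEN_OFFSET) % 4096,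
--             (slots[5] - CODE_TOKEN_OFFSET) % 4096,
--             (slots[6] - CODE_TOKEN_OFFSET) % 4096,
--         ])
--     return [l1, l2, l3]
-- ===== SOURCE B (Python) =====
-- CODE_END_TOKEN_ID = 128258
-- CODE_TOKEN_OFFSET = 128266
--
-- def _col(norm, k):
--     """Column k of the 7-wide frame grid: elements at positions k, k+7, k+14, ..."""
--     return [norm[i] for i in range(k, len(norm), 7)]
--
-- def unpack_snac_tokens(vocab_ids):
--     """将 7-token SNAC 帧解包为 3 层级编码 [L1, L2, L3]"""
--     if vocab_ids and vocab_ids[-1] == CODE_END_TOKEN_ID: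
--         vocab_ids = vocab_ids[:-1]
--     frames = len(vocab_ids) // 7
--     norm = [(t - CODE_TOKEN_OFFSET) % 4096
--             for t in vocab_ids[:frames * 7]]
--     l2 = [v for pair in zip(_col(norm, 1), _col(norm, 4)) for v in pair]
--     l3 = [v for quad in zip(_col(norm, 2), _col(norm, 3),
--                             _col(norm, 5), _col(norm, 6)) for v in quad]
--     return [_col(norm, 0), l2, l3]
-- ===== Notes on version B (the rewrite author's own statement) =====
-- stated objective: alternative
-- what changed: B normalizes the truncated token list once and builds the three layers column-wise with one strided pass per code slot (range(k, len, 7)) interleaved by zip, instead of A's frame-by-frame loop that slices out 7 tokens per frame and appends slot by slot.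
import Mathlib
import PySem

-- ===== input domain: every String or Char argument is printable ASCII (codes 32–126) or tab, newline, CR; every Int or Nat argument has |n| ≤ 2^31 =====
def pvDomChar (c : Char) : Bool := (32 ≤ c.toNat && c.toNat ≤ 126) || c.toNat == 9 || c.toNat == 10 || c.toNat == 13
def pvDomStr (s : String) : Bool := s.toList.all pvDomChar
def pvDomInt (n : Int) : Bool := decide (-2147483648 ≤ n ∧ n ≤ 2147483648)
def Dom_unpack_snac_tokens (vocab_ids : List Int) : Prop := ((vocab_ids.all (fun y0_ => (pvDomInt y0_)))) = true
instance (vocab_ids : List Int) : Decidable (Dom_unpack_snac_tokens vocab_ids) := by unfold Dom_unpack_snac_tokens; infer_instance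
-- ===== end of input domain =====

-- B unpacks the frame grid column-wise (one strided pass per code slot, interleaved by zip)
-- instead of A's frame-by-frame loop with per-frame slicing; objective: alternative decomposition.

-- ===== PORT A =====
-- literal port of A; the pyGetD default 0 is never used: every slots[r] access is in range
def unpack_snac_tokens (vocab_ids : List Int) : List (List Int) :=
  let v := if vocab_ids ≠ [] ∧ PySem.List.pyGetD vocab_ids (-1) 0 = 128258
           then PySem.List.slice vocab_ids none (some (-1)) else vocab_ids
  let frames := PySem.Int.floordiv (PySem.List.len v) 7
  let v2 := PySem.List.slice v none (some (frames * 7))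
  if frames = 0 then [[], [], []]
  else
    let st := (PySem.List.pyRange 0 frames 1).foldl
      (fun t i =>
        let slots := PySem.List.slice v2 (some (i * 7)) (some ((i + 1) * 7))
        (t.1 ++ [PySem.Int.mod (PySem.List.pyGetD slots 0 0 - 128266) 4096],
         t.2.1 ++ [PySem.Int.mod (PySem.List.pyGetD slots 1 0 - 128266) 4096,
                   PySem.Int.mod (PySem.List.pyGetD slots 4 0 - 128266) 4096],
         t.2.2 ++ [PySem.Int.mod (PySem.List.pyGetD slots 2 0 - 128266) 4096,
                   PySem.Int.mod (PySem.List.pyGetD slots 3 0 - 128266) 4096,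
                   PySem.Int.mod (PySem.List.pyGetD slots 5 0 - 128266) 4096,
                   PySem.Int.mod (PySem.List.pyGetD slots 6 0 - 128266) 4096]))
      (([] : List Int), ([] : List Int), ([] : List Int))
    [st.1, st.2.1, st.2.2]

-- ===== PORT B =====
-- _col(norm, k) = [norm[i] for i in range(k, len(norm), 7)]
def pvCol (xs : List Int) (k : Int) : List Int :=
  (PySem.List.pyRange k (PySem.List.len xs) 7).map (fun i => PySem.List.pyGetD xs i 0)

-- Python's 2- and 4-way zip is ported as nested List.zip
def unpack_snac_tokens_alt (vocab_ids : List Int) : List (List Int) :=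
  let v := if vocab_ids ≠ [] ∧ PySem.List.pyGetD vocab_ids (-1) 0 = 128258
           then PySem.List.slice vocab_ids none (some (-1)) else vocab_ids
  let frames := PySem.Int.floordiv (PySem.List.len v) 7
  let norm := (PySem.List.slice v none (some (frames * 7))).map
      (fun t => PySem.Int.mod (t - 128266) 4096)
  let l2 := ((pvCol norm 1).zip (pvCol norm 4)).flatMap (fun p => [p.1, p.2])
  let l3 := (((pvCol norm 2).zip (pvCol norm 3)).zip ((pvCol norm 5).zip (pvCol norm 6))).flatMap
      (fun p => [p.1.1, p.1.2, p.2.1, p.2.2])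
  [pvCol norm 0, l2, l3]

-- ===== PRECONDITION & SPEC =====
def Spec_unpack_snac_tokens (vocab_ids : List Int) (out : List (List Int)) : Prop := out = unpack_snac_tokens_alt vocab_ids
instance (vocab_ids : List Int) (out : List (List Int)) : Decidable (Spec_unpack_snac_tokens vocab_ids out) := by unfold Spec_unpack_snac_tokens; infer_instance

-- ===== CLAIM (what is proved, stated in full; the proofs are below) =====
def Claim_equal_unpack_snac_tokens : Prop := ∀ (vocab_ids : List Int), Dom_unpack_snac_tokens vocab_ids → Spec_unpack_snac_tokens vocab_ids (unpack_snac_tokens vocab_ids)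

-- ===== LEMMAS AND PROOFS =====

-- proof-side names for the (definitionally equal) pieces of the two port bodies after the common trim
def pvF (v : List Int) : Int := PySem.Int.floordiv (PySem.List.len v) 7

def pvTrunc (v : List Int) : List Int := PySem.List.slice v none (some (pvF v * 7))

def pvStep (v2 : List Int) : (List Int × List Int × List Int) → Int → (List Int × List Int × List Int) :=
  fun t i =>
    let slots := PySem.List.slice v2 (some (i * 7)) (some ((i + 1) * 7))
    (t.1 ++ [PySem.Int.mod (PySem.List.pyGetD slots 0 0 - 128266) 4096],
     t.2.1 ++ [PySem.Int.mod (PySem.List.pyGetD slots 1 0 - 128266) 4096,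
               PySem.Int.mod (PySem.List.pyGetD slots 4 0 - 128266) 4096],
     t.2.2 ++ [PySem.Int.mod (PySem.List.pyGetD slots 2 0 - 128266) 4096,
               PySem.Int.mod (PySem.List.pyGetD slots 3 0 - 128266) 4096,
               PySem.Int.mod (PySem.List.pyGetD slots 5 0 - 128266) 4096,
               PySem.Int.mod (PySem.List.pyGetD slots 6 0 - 128266) 4096])

def pvLoop (v : List Int) : List Int × List Int × List Int :=
  (PySem.List.pyRange 0 (pvF v) 1).foldl (pvStep (pvTrunc v)) (([] : List Int), ([] : List Int), ([] : List Int))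

def pvNorm (v : List Int) : List Int := (pvTrunc v).map (fun t => PySem.Int.mod (t - 128266) 4096)

def pvEl (v2 : List Int) (i r : Int) : Int :=
  PySem.Int.mod (PySem.List.pyGetD (PySem.List.slice v2 (some (i * 7)) (some ((i + 1) * 7))) r 0 - 128266) 4096

-- A's loop appends to each component of the triple: it is three flatMaps
theorem pv_A_loop (v2 : List Int) (L : List Int) (a b c : List Int) :
    L.foldl (pvStep v2) (a, b, c)
      = (a ++ L.flatMap (fun i => [pvEl v2 i 0]),
         b ++ L.flatMap (fun i => [pvEl v2 i 1, pvEl v2 i 4]),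
         c ++ L.flatMap (fun i => [pvEl v2 i 2, pvEl v2 i 3, pvEl v2 i 5, pvEl v2 i 6])) := by
  induction L generalizing a b c with
  | nil => simp
  | cons x L ih =>
      have h : pvStep v2 (a, b, c) x
          = (a ++ [pvEl v2 x 0], b ++ [pvEl v2 x 1, pvEl v2 x 4],
             c ++ [pvEl v2 x 2, pvEl v2 x 3, pvEl v2 x 5, pvEl v2 x 6]) := rfl
      rw [List.foldl_cons, h, ih]
      simp

-- the strided comprehension, characterised over List.range
theorem pv_col_eq (xs : List Int) (F : Nat) (hlen : xs.length = 7 * F) (k : Int)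
    (hk0 : 0 ≤ k) (hk : k < 7) :
    pvCol xs k = (List.range F).map (fun (j : Nat) => PySem.List.pyGetD xs (k + 7 * (j : Int)) 0) := by
  unfold pvCol
  rw [PySem.List.pyRange_of_pos _ _ (by norm_num : (0:Int) < 7), List.map_map]
  have hcount : (if k < PySem.List.len xs then ((PySem.List.len xs - k + 7 - 1) / 7).toNat else 0) = F := by
    simp only [PySem.List.len_eq, hlen]
    split_ifs with h <;> push_cast at h ⊢ <;> omega
  rw [hcount]
  exact List.map_congr_left (fun a _ => rfl)

-- the in-range element of A's per-frame slice is the corresponding element of the truncated list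
theorem pv_slot (tl : List Int) (F : Nat) (h : tl.length = 7 * F) (i r : Int)
    (hi0 : 0 ≤ i) (hi : i < (F : Int)) (hr0 : 0 ≤ r) (hr : r < 7) :
    PySem.List.pyGetD (PySem.List.slice tl (some (i * 7)) (some ((i + 1) * 7))) r 0
      = PySem.List.pyGetD tl (i * 7 + r) 0 := by
  rw [PySem.List.slice_toNat tl (by omega) (by omega)]
  have hlen : (List.take (((i + 1) * 7).toNat - (i * 7).toNat) (List.drop (i * 7).toNat tl)).length = 7 := by
    simp [List.length_take, List.length_drop, h]; omega
  rw [PySem.List.pyGetD_eq_getElem _ _ hr0 (by rw [hlen]; exact_mod_cast hr),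
      PySem.List.pyGetD_eq_getElem _ _ (by omega) (by push_cast [h]; omega)]
  rw [List.getElem_take, List.getElem_drop]
  congr 1
  omega

-- pyGetD through map at an in-range index
theorem pv_getD_map (f : Int → Int) (xs : List Int) (i : Int) (h0 : 0 ≤ i)
    (h1 : i < (xs.length : Int)) :
    PySem.List.pyGetD (xs.map f) i 0 = f (PySem.List.pyGetD xs i 0) := by
  rw [PySem.List.pyGetD_eq_getElem _ _ h0 (by simpa using h1),
      PySem.List.pyGetD_eq_getElem _ _ h0 h1, List.getElem_map]

-- the whole equivalence, on the (arbitrary) trimmed list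
theorem pv_core (v : List Int) :
    (if pvF v = 0 then ([[], [], []] : List (List Int))
     else [(pvLoop v).1, (pvLoop v).2.1, (pvLoop v).2.2])
    = [pvCol (pvNorm v) 0,
       ((pvCol (pvNorm v) 1).zip (pvCol (pvNorm v) 4)).flatMap (fun p => [p.1, p.2]),
       (((pvCol (pvNorm v) 2).zip (pvCol (pvNorm v) 3)).zip
          ((pvCol (pvNorm v) 5).zip (pvCol (pvNorm v) 6))).flatMap
         (fun p => [p.1.1, p.1.2, p.2.1, p.2.2])] := by
  have hfr : pvF v = ((v.length / 7 : Nat) : Int) := by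
    rw [pvF, PySem.List.len_eq]; exact_mod_cast PySem.Int.floordiv_natCast v.length 7
  set F : Nat := v.length / 7 with hF
  have htrunc : pvTrunc v = List.take (7 * F) v := by
    rw [pvTrunc, PySem.List.slice_to v (by rw [hfr]; positivity)]
    congr 1; rw [hfr]; omega
  set tl := List.take (7 * F) v with htl
  have hlen : tl.length = 7 * F := by
    rw [htl, List.length_take]; have := Nat.div_mul_le_self v.length 7; omega
  set f : Int → Int := fun t => PySem.Int.mod (t - 128266) 4096 with hf
  have hnormdef : pvNorm v = tl.map f := by rw [pvNorm, htrunc]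
  have hnl : (tl.map f).length = 7 * F := by rw [List.length_map, hlen]
  have hB : ∀ (k : Int), 0 ≤ k → k < 7 →
      pvCol (tl.map f) k
        = (List.range F).map (fun (j : Nat) => f (PySem.List.pyGetD tl (k + 7 * (j : Int)) 0)) := by
    intro k hk0 hk7
    rw [pv_col_eq (tl.map f) F hnl k hk0 hk7]
    refine List.map_congr_left (fun j hj => ?_)
    have hjF : j < F := List.mem_range.mp hj
    exact pv_getD_map f tl (k + 7 * (j : Int)) (by positivity) (by push_cast [hlen]; omega)
  have hA : ∀ (r : Int), 0 ≤ r → r < 7 → ∀ (j : Nat), j < F →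
      pvEl tl (j : Int) r = f (PySem.List.pyGetD tl (r + 7 * (j : Int)) 0) := by
    intro r hr0 hr7 j hjF
    rw [pvEl, pv_slot tl F hlen (j : Int) r (by positivity) (by exact_mod_cast hjF) hr0 hr7, hf]
    have h : (j : Int) * 7 + r = r + 7 * (j : Int) := by ring
    rw [h]
  rw [hnormdef]
  by_cases h0 : pvF v = 0
  · have hF0 : F = 0 := by omega
    rw [if_pos h0,
        hB 0 (by norm_num) (by norm_num), hB 1 (by norm_num) (by norm_num),
        hB 2 (by norm_num) (by norm_num), hB 3 (by norm_num) (by norm_num),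
        hB 4 (by norm_num) (by norm_num), hB 5 (by norm_num) (by norm_num),
        hB 6 (by norm_num) (by norm_num), hF0]
    simp
  · rw [if_neg h0, pvLoop, htrunc, pv_A_loop]
    have hR : PySem.List.pyRange 0 (pvF v) 1 = (List.range F).map (fun (j : Nat) => (j : Int)) := by
      rw [PySem.List.pyRange_zero (pvF v), hfr]; norm_num
    rw [hR]
    dsimp only
    simp only [List.nil_append, List.flatMap_map]
    rw [hB 0 (by norm_num) (by norm_num), hB 1 (by norm_num) (by norm_num),
        hB 2 (by norm_num) (by norm_num), hB 3 (by norm_num) (by norm_num),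
        hB 4 (by norm_num) (by norm_num), hB 5 (by norm_num) (by norm_num),
        hB 6 (by norm_num) (by norm_num)]
    simp only [List.zip_map', List.flatMap_map]
    refine congrArg₂ _ ?_ (congrArg₂ _ ?_ (congrArg₂ _ ?_ rfl))
    · rw [← List.map_eq_flatMap]
      refine List.map_congr_left (fun j hj => ?_)
      have hjF : j < F := List.mem_range.mp hj
      rw [hA 0 (by norm_num) (by norm_num) j hjF]
    · refine List.flatMap_congr (fun j hj => ?_)
      have hjF : j < F := List.mem_range.mp hj
      rw [hA 1 (by norm_num) (by norm_num) j hjF, hA 4 (by norm_num) (by norm_num) j hjF]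
    · refine List.flatMap_congr (fun j hj => ?_)
      have hjF : j < F := List.mem_range.mp hj
      rw [hA 2 (by norm_num) (by norm_num) j hjF, hA 3 (by norm_num) (by norm_num) j hjF,
          hA 5 (by norm_num) (by norm_num) j hjF, hA 6 (by norm_num) (by norm_num) j hjF]

-- ===== VERDICT (by name: the statement is the Claim_ definition above) =====
theorem unpack_snac_tokens_spec : Claim_equal_unpack_snac_tokens := by
  intro vocab_ids _
  show unpack_snac_tokens vocab_ids = unpack_snac_tokens_alt vocab_ids
  exact pv_core (if vocab_ids ≠ [] ∧ PySem.List.pyGetD vocab_ids (-1) 0 = 128258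
      then PySem.List.slice vocab_ids none (some (-1)) else vocab_ids)
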